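-- pv_equiv track=rewrite | github.com/fbjerknes/rbag | src/synergy.py | process_box
-- ===== SOURCE A (Python) =====
-- def process_box(data):
--     lines = []
--     last = 0
--     for i in range(len(data)):
--         if data[i] == '\n':
--             lines.append(data[last:i])
--             last = i+1
--     lines.append(data[last:])
--
--     vals = []
--     for i in lines:
--         if "Team Totals" in i:
--             prev = 0
--             count = 0
--             for j in range(len(i)):
--                 if i[j] == ' ':
--                     count += 1
--                     if count > 2 and i[prev:j] != "Team" and i[prev:j] != "Totals":
--                         vals.append(i[prev:j])
--                     prev = j+1
--             vals.append(i[prev:])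
--
--     return vals
-- ===== SOURCE B (Python) =====
-- def process_box(data):
--     vals = []
--     for line in data.split('\n'):
--         if "Team Totals" in line:
--             tokens = line.split(' ')
--             vals += [t for i, t in enumerate(tokens[:-1])
--                      if i >= 2 and t != "Team" and t != "Totals"]
--             vals.append(tokens[-1])
--     return vals
-- ===== Notes on version B (the rewrite author's own statement) =====
-- stated objective: simpler
-- what changed: B replaces A's two hand-rolled character scans with slice/prev/count index bookkeeping by tokenizing with str.split and filtering tokens by their index, appending the last token unconditionally.
import Mathlib
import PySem

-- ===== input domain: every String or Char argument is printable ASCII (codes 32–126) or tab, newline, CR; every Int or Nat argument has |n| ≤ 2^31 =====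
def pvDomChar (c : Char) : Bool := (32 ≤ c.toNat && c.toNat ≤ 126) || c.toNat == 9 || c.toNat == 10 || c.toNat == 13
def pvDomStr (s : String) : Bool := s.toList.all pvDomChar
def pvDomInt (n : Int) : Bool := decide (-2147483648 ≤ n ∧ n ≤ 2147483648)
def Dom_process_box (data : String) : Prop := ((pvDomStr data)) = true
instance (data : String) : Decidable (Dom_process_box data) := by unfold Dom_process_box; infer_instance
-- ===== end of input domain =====

-- B replaces A's two hand-rolled character scans (prev/count index bookkeeping) by a
-- split-into-tokens-then-filter-by-index pass per line; objective: simpler, same O(n) cost.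


-- ===== PORT A =====
-- literal transliteration of A; Python strings are handled as List Char (String.ofList at the
-- end); data[i] is ported as getD with an unreachable default — every accessed index is < length.
-- ===== PORT B =====  (see the marker below)
def process_box (data : String) : List String :=
  let cs := data.toList
  let n := cs.length
  let st := (List.range n).foldl
      (fun (st : List (List Char) × Nat) i =>
        if cs.getD i '\x00' == '\n' then
          (st.1 ++ [PySem.List.slice cs (st.2 : Int) (i : Int)], i + 1)
        else st) ([], 0)
  let lines := st.1 ++ [PySem.List.slice cs (st.2 : Int) (n : Int)]
  let vals := lines.foldl
      (fun vals i =>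
        if PySem.Chars.isIn "Team Totals".toList i then
          let st2 := (List.range i.length).foldl
              (fun (st : List (List Char) × Nat × Nat) j =>
                if i.getD j '\x00' == ' ' then
                  ((if st.2.2 + 1 > 2 ∧ PySem.List.slice i (st.2.1 : Int) (j : Int) ≠ "Team".toList
                        ∧ PySem.List.slice i (st.2.1 : Int) (j : Int) ≠ "Totals".toList then
                      st.1 ++ [PySem.List.slice i (st.2.1 : Int) (j : Int)]
                    else st.1), j + 1, st.2.2 + 1)
                else st) (vals, 0, 0)
          st2.1 ++ [PySem.List.slice i (st2.2.1 : Int) (i.length : Int)]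
        else vals) []
  vals.map String.ofList

-- ===== PORT B =====
-- literal transliteration of Source B; line.split(c) for a ONE-CHARACTER separator is exactly
-- List.splitOn c; tokens[-1] is tokens.getLastD [] (Python split never returns an empty list).
def process_box_alt (data : String) : List String :=
  let vals := (data.toList.splitOn '\n').foldl
      (fun vals line =>
        if PySem.Chars.isIn "Team Totals".toList line then
          let tokens := line.splitOn ' '
          (vals ++ tokens.dropLast.zipIdx.filterMap
              (fun p => if 2 ≤ p.2 ∧ p.1 ≠ "Team".toList ∧ p.1 ≠ "Totals".toList then
                          some p.1 else none))
            ++ [tokens.getLastD []]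
        else vals) []
  vals.map String.ofList


-- ===== PRECONDITION & SPEC =====
def Spec_process_box (data : String) (out : List String) : Prop := out = process_box_alt data
instance (data : String) (out : List String) : Decidable (Spec_process_box data out) := by unfold Spec_process_box; infer_instance

-- ===== CLAIM (what is proved, stated in full; the proofs are below) =====
def Claim_equal_process_box : Prop := ∀ (data : String), Dom_process_box data → Spec_process_box data (process_box data)

-- ===== LEMMAS AND PROOFS =====

def pvStep (sep : Char) (keep : Nat → List Char → Bool) (cs : List Char)
    (st : List (List Char) × Nat × Nat) (j : Nat) : List (List Char) × Nat × Nat :=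
  if cs.getD j '\x00' == sep then
    ((if keep (st.2.2 + 1) (PySem.List.slice cs (st.2.1 : Int) (j : Int)) then
        st.1 ++ [PySem.List.slice cs (st.2.1 : Int) (j : Int)]
      else st.1), j + 1, st.2.2 + 1)
  else st
def pvProc (keep : Nat → List Char → Bool) : List (List Char) → Nat → List (List Char)
  | [], _ => []
  | [last], _ => [last]
  | tok :: r :: rest, c =>
      (if keep (c + 1) tok then [tok] else []) ++ pvProc keep (r :: rest) (c + 1)
lemma pvSlice_eq (cs : List Char) (a b : Nat) :
    PySem.List.slice cs (a : Int) (b : Int) = (cs.drop a).take (b - a) := by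
  simp [PySem.List.slice_natCast]


lemma pvSplitOn_cons (c a : Char) (l : List Char) :
    (a :: l).splitOn c = if a = c then [] :: l.splitOn c
                         else (l.splitOn c).modifyHead (a :: ·) := by
  simp only [List.splitOn, List.splitOnP_cons]
  by_cases h : a = c <;> simp [h]

lemma pvSplitOn_ne_nil (c : Char) (l : List Char) : l.splitOn c ≠ [] :=
  List.splitOnP_ne_nil _ _


lemma pvScan (sep : Char) (keep : Nat → List Char → Bool) (cs : List Char) :
    ∀ (d : List Char) (p prev : Nat) (vals : List (List Char)) (c : Nat),
      cs.drop p = d → prev ≤ p →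
      (let st := (List.range' p (cs.length - p)).foldl (pvStep sep keep cs) (vals, prev, c)
       st.1 ++ [PySem.List.slice cs (st.2.1 : Int) (cs.length : Int)])
      = vals ++ pvProc keep
          ((d.splitOn sep).modifyHead
            (fun h => PySem.List.slice cs (prev : Int) (p : Int) ++ h)) c := by
  intro d
  induction d with
  | nil =>
    intro p prev vals c hd hle
    have hlen : cs.length ≤ p := List.drop_eq_nil_iff.mp hd
    have hz : cs.length - p = 0 := by omega
    have h1 : PySem.List.slice cs (prev : Int) (cs.length : Int) = cs.drop prev := by
      rw [pvSlice_eq]; exact List.take_of_length_le (by simp)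
    have h2 : PySem.List.slice cs (prev : Int) (p : Int) = cs.drop prev := by
      rw [pvSlice_eq]; exact List.take_of_length_le (by rw [List.length_drop]; omega)
    simp [hz, pvProc, h1, h2]
  | cons ch d' ih =>
    intro p prev vals c hd hle
    have hp : p < cs.length := by
      by_contra h
      rw [List.drop_eq_nil_of_le (by omega)] at hd; simp at hd
    have hcons := List.drop_eq_getElem_cons hp
    rw [hd] at hcons
    have hget : cs[p] = ch := by injection hcons with h1 h2; exact h1.symm
    have hdrop : cs.drop (p + 1) = d' := by injection hcons with h1 h2; exact h2.symm
    have hgd : cs[p]? = some ch := by rw [List.getElem?_eq_getElem hp, hget]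
    have hrange : List.range' p (cs.length - p) = p :: List.range' (p + 1) (cs.length - (p + 1)) := by
      have h : cs.length - p = (cs.length - (p + 1)) + 1 := by omega
      rw [h, List.range'_succ]
    by_cases hch : ch = sep
    · -- this position is the separator
      have hstep : pvStep sep keep cs (vals, prev, c) p
          = ((if keep (c + 1) (PySem.List.slice cs (prev : Int) (p : Int)) then
                vals ++ [PySem.List.slice cs (prev : Int) (p : Int)] else vals), p + 1, c + 1) := by
        simp [pvStep, List.getD, hgd, hch]
      rw [hrange, List.foldl_cons, hstep]
      have hIH := ih (p + 1) (p + 1)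
        ((if keep (c + 1) (PySem.List.slice cs (prev : Int) (p : Int)) then
            vals ++ [PySem.List.slice cs (prev : Int) (p : Int)] else vals)) (c + 1) hdrop (le_refl _)
      simp only at hIH
      rw [hIH]
      have hz : PySem.List.slice cs ((↑(p+1) : Int)) ((↑(p+1) : Int)) = [] := by
        rw [pvSlice_eq]; simp
      subst hch
      rcases hq : d'.splitOn ch with _ | ⟨h0, hs⟩
      · exact absurd hq (pvSplitOn_ne_nil _ _)
      rw [pvSplitOn_cons, if_pos rfl, hq, hz]
      simp only [List.modifyHead_cons, List.append_nil, List.nil_append, pvProc]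
      split_ifs with hk <;> simp
    · -- ordinary character
      have hstep : pvStep sep keep cs (vals, prev, c) p = (vals, prev, c) := by
        simp [pvStep, List.getD, hgd, hch]
      rw [hrange, List.foldl_cons, hstep]
      have hIH := ih (p + 1) prev vals c hdrop (by omega)
      simp only at hIH
      have hslice : PySem.List.slice cs (prev : Int) ((↑(p+1) : Int))
          = PySem.List.slice cs (prev : Int) (p : Int) ++ [ch] := by
        rw [pvSlice_eq, pvSlice_eq]
        have h1 : p + 1 - prev = (p - prev) + 1 := by omega
        rw [h1, List.take_add_one]
        congr 1
        have h2 : (cs.drop prev)[p - prev]? = some ch := by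
          rw [List.getElem?_drop]
          have h3 : prev + (p - prev) = p := by omega
          rw [h3, hgd]
        simp [h2]
      simp only [hslice, List.append_assoc, List.singleton_append] at hIH
      rw [hIH, pvSplitOn_cons, if_neg hch, List.modifyHead_modifyHead]
      rfl

def pvKeepI (c : Nat) (t : List Char) : Bool :=
  decide (c > 2 ∧ t ≠ "Team".toList ∧ t ≠ "Totals".toList)

lemma pvProc_true (toks : List (List Char)) : ∀ c, pvProc (fun _ _ => true) toks c = toks := by
  induction toks with
  | nil => intro c; rfl
  | cons tok rest ih =>
    intro c
    cases rest with
    | nil => rfl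
    | cons r rs => simp [pvProc, ih]

lemma pvProc_keepI (toks : List (List Char)) : ∀ c, toks ≠ [] →
    pvProc pvKeepI toks c
      = (toks.dropLast.zipIdx c).filterMap
          (fun p => if 2 ≤ p.2 ∧ p.1 ≠ "Team".toList ∧ p.1 ≠ "Totals".toList then
                      some p.1 else none)
        ++ [toks.getLastD []] := by
  induction toks with
  | nil => intro c h; exact absurd rfl h
  | cons tok rest ih =>
    intro c _
    cases rest with
    | nil => simp [pvProc]
    | cons r rs =>
      by_cases h1 : 2 ≤ c ∧ ¬tok = ['T','e','a','m'] ∧ ¬tok = ['T','o','t','a','l','s']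
      · have hk : pvKeepI (c + 1) tok = true := by
          unfold pvKeepI; rw [decide_eq_true_eq]
          exact ⟨by omega, by simpa using h1.2.1, by simpa using h1.2.2⟩
        simp [pvProc, List.zipIdx_cons, ih (c + 1) (by simp), hk, h1]
      · have hk : pvKeepI (c + 1) tok = false := by
          unfold pvKeepI; rw [decide_eq_false_iff_not]
          rintro ⟨hgt, ht1, ht2⟩
          exact h1 ⟨by omega, by simpa using ht1, by simpa using ht2⟩
        simp [pvProc, List.zipIdx_cons, ih (c + 1) (by simp), hk, h1]

-- A's lines loop (pair state) tracks the generic scan (triple state, keep = true)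
lemma pvLinesBridge (cs : List Char) (L : List Nat) : ∀ (vals : List (List Char)) (prev c : Nat),
    (L.foldl (fun (st : List (List Char) × Nat) i =>
        if cs.getD i '\x00' == '\n' then
          (st.1 ++ [PySem.List.slice cs (st.2 : Int) (i : Int)], i + 1)
        else st) (vals, prev))
    = ((L.foldl (pvStep '\n' (fun _ _ => true) cs) (vals, prev, c)).1,
       (L.foldl (pvStep '\n' (fun _ _ => true) cs) (vals, prev, c)).2.1) := by
  induction L with
  | nil => intro vals prev c; rfl
  | cons i L ih =>
    intro vals prev c
    simp only [List.foldl_cons]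
    by_cases h : cs.getD i '\x00' == '\n'
    · simp only [pvStep, h, if_pos]
      exact ih _ _ _
    · simp only [pvStep, h, if_false, Bool.false_eq_true]
      exact ih _ _ _

-- A's inner loop is the generic scan with keep = pvKeepI
lemma pvInnerBridge (i : List Char) :
    (fun (st : List (List Char) × Nat × Nat) j =>
        if i.getD j '\x00' == ' ' then
          ((if st.2.2 + 1 > 2 ∧ PySem.List.slice i (st.2.1 : Int) (j : Int) ≠ "Team".toList
                ∧ PySem.List.slice i (st.2.1 : Int) (j : Int) ≠ "Totals".toList then
              st.1 ++ [PySem.List.slice i (st.2.1 : Int) (j : Int)]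
            else st.1), j + 1, st.2.2 + 1)
        else st)
    = pvStep ' ' pvKeepI i := by
  funext st j
  simp only [pvStep, pvKeepI, decide_eq_true_eq]

lemma pvSlice_zero_zero (cs : List Char) : PySem.List.slice cs ((0 : Nat) : Int) ((0 : Nat) : Int) = [] := by
  rw [pvSlice_eq]; simp

-- lines of A = splitOn '\n'
lemma pvLines_eq (cs : List Char) :
    (let st := (List.range cs.length).foldl
        (fun (st : List (List Char) × Nat) i =>
          if cs.getD i '\x00' == '\n' then
            (st.1 ++ [PySem.List.slice cs (st.2 : Int) (i : Int)], i + 1)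
          else st) ([], 0)
     st.1 ++ [PySem.List.slice cs (st.2 : Int) (cs.length : Int)])
    = cs.splitOn '\n' := by
  simp only [pvLinesBridge cs (List.range cs.length) [] 0 0]
  have h := pvScan '\n' (fun _ _ => true) cs cs 0 0 [] 0 rfl (le_refl 0)
  simp only [List.range_eq_range', Nat.sub_zero] at h ⊢
  rw [h, pvSlice_zero_zero]
  have hmid : ∀ (X : List (List Char)), List.modifyHead (fun h => h) X = X := by
    intro X; cases X <;> rfl
  simp only [List.nil_append]
  rw [hmid, pvProc_true]

-- A's processing of one matched line = B's token pass
lemma pvLine_eq (i : List Char) (vals : List (List Char)) :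
    (let st2 := (List.range i.length).foldl
        (fun (st : List (List Char) × Nat × Nat) j =>
          if i.getD j '\x00' == ' ' then
            ((if st.2.2 + 1 > 2 ∧ PySem.List.slice i (st.2.1 : Int) (j : Int) ≠ "Team".toList
                  ∧ PySem.List.slice i (st.2.1 : Int) (j : Int) ≠ "Totals".toList then
                st.1 ++ [PySem.List.slice i (st.2.1 : Int) (j : Int)]
              else st.1), j + 1, st.2.2 + 1)
          else st) (vals, 0, 0)
     st2.1 ++ [PySem.List.slice i (st2.2.1 : Int) (i.length : Int)])
    = (vals ++ (i.splitOn ' ').dropLast.zipIdx.filterMap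
          (fun p => if 2 ≤ p.2 ∧ p.1 ≠ "Team".toList ∧ p.1 ≠ "Totals".toList then
                      some p.1 else none))
        ++ [(i.splitOn ' ').getLastD []] := by
  simp only [pvInnerBridge i]
  have h := pvScan ' ' pvKeepI i i 0 0 vals 0 rfl (le_refl 0)
  simp only [List.range_eq_range', Nat.sub_zero] at h ⊢
  rw [h, pvSlice_zero_zero]
  have hmid : ∀ (X : List (List Char)), List.modifyHead (fun h => h) X = X := by
    intro X; cases X <;> rfl
  simp only [List.nil_append]
  rw [hmid, pvProc_keepI _ 0 (pvSplitOn_ne_nil _ _)]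
  simp

theorem pv_main (data : String) : process_box data = process_box_alt data := by
  unfold process_box process_box_alt
  simp only [pvLines_eq data.toList]
  congr 1
  congr 1
  funext vals i
  by_cases h : PySem.Chars.isIn "Team Totals".toList i = true
  · simp only [if_pos h]
    exact pvLine_eq i vals
  · rw [if_neg h, if_neg h]

-- ===== VERDICT (by name: the statement is the Claim_ definition above) =====
theorem process_box_spec : Claim_equal_process_box := by
  intro data _
  exact pv_main data
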